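-- pv_equiv track=rewrite | github.com/videlalvaro/emilio | python/privacy/eval_pf_task_metrics.py | decode_entities
-- ===== SOURCE A (Python) =====
-- def decode_entities(labels: list[str]) -> list[tuple[int, int, str]]:
--     """BIOES -> list of (start_tok, end_tok_inclusive, entity_type)."""
--     spans: list[tuple[int, int, str]] = []
--     i, n = 0, len(labels)
--     while i < n:
--         tag = labels[i]
--         if tag == "O" or tag == "<pad>":
--             i += 1
--             continue
--         if "-" not in tag:
--             i += 1
--             continue
--         prefix, etype = tag.split("-", 1)
--         if prefix == "S":
--             spans.append((i, i, etype)); i += 1; continue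
--         if prefix == "B":
--             j = i + 1
--             while j < n and labels[j].endswith("-" + etype) and labels[j].split("-", 1)[0] in ("I", "E"):
--                 if labels[j].startswith("E-"):
--                     j += 1; break
--                 j += 1
--             spans.append((i, j - 1, etype)); i = j; continue
--         # stray I- or E- — skip (model error against schema)
--         i += 1
--     return spans
-- ===== SOURCE B (Python) =====
-- def decode_entities(labels: list[str]) -> list[tuple[int, int, str]]:
--     """BIOES -> spans, as a single flat pass with explicit open-span state."""
--     spans: list[tuple[int, int, str]] = []
--     open_span = None  # (start, end_inclusive, etype) of the span being built
--     for t, tag in enumerate(labels):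
--         parsed = tuple(tag.split("-", 1)) if "-" in tag else None
--         if (open_span is not None and parsed is not None
--                 and parsed[0] in ("I", "E")
--                 and tag.endswith("-" + open_span[2])):
--             s, _, oet = open_span
--             if tag.startswith("E-"):
--                 spans.append((s, t, oet))
--                 open_span = None
--             else:
--                 open_span = (s, t, oet)
--         else:
--             if open_span is not None:
--                 spans.append(open_span)
--             open_span = None
--             if parsed is not None:
--                 if parsed[0] == "S":
--                     spans.append((t, t, parsed[1]))
--                 elif parsed[0] == "B":
--                     open_span = (t, t, parsed[1])
--     if open_span is not None:
--         spans.append(open_span)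
--     return spans
-- ===== Notes on version B (the rewrite author's own statement) =====
-- stated objective: alternative
-- what changed: Replaces A's nested while loops (an inner forward scan re-examining tokens after each B- tag, with index jumping i = j) by a single flat pass over enumerate(labels) that maintains an explicit open-span state and flushes it on close or at the end.
import Mathlib
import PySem

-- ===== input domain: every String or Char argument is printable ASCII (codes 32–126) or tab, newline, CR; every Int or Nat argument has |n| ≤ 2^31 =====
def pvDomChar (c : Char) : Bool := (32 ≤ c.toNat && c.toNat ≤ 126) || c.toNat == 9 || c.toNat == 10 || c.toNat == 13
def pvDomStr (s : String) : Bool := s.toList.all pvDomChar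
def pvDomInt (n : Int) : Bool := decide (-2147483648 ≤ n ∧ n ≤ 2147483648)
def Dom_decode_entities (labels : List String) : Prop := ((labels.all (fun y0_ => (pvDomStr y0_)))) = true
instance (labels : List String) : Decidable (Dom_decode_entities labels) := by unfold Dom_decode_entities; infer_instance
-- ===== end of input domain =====

-- B replaces A's nested while loops (inner forward scan after each "B-") by one flat pass
-- with explicit open-span state; same return value, different decomposition (no speed claim).

-- shared low-level helper: tag.split("-", 1) as a pair (prefix, rest)
-- (exact: splitMax? is Python's str.split with maxsplit; a dash-free tag yields (tag, ""))
def pvSplitDash (tag : String) : String × String :=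
  match PySem.Str.splitMax? tag "-" 1 with
  | some (a :: b :: _) => (a, b)
  | some [a] => (a, "")
  | _ => ("", "")

-- ===== PORT A =====
-- inner 'while j < n and …' scan of A: walks the suffix after the B- tag,
-- returns (final j, remaining suffix starting at index j)
def decodeA_inner (etype : String) (j : Int) (rest : List String) : Int × List String :=
  match rest with
  | [] => (j, [])
  | l :: rest' =>
    if PySem.Str.endswith l ("-" ++ etype)
        && ((pvSplitDash l).1 == "I" || (pvSplitDash l).1 == "E") then
      if PySem.Str.startswith l "E-" then (j + 1, rest')
      else decodeA_inner etype (j + 1) rest'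
    else (j, l :: rest')

theorem decodeA_inner_len (etype : String) (j : Int) (rest : List String) :
    (decodeA_inner etype j rest).2.length ≤ rest.length := by
  induction rest generalizing j with
  | nil => simp [decodeA_inner]
  | cons l rest' ih =>
    simp only [decodeA_inner]
    split
    · split
      · simp
      · exact le_trans (ih _) (by simp)
    · simp

-- outer 'while i < n' loop of A: i is the index of the head of rest
def decodeA_go (i : Int) (rest : List String) (spans : List (Int × Int × String)) :
    List (Int × Int × String) :=
  match rest with
  | [] => spans
  | tag :: rest' =>
    if tag == "O" || tag == "<pad>" then decodeA_go (i + 1) rest' spans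
    else if !(PySem.Str.isIn "-" tag) then decodeA_go (i + 1) rest' spans
    else
      let p := pvSplitDash tag
      if p.1 == "S" then decodeA_go (i + 1) rest' (spans ++ [(i, i, p.2)])
      else if p.1 == "B" then
        let r := decodeA_inner p.2 (i + 1) rest'
        decodeA_go r.1 r.2 (spans ++ [(i, r.1 - 1, p.2)])
      else decodeA_go (i + 1) rest' spans
termination_by rest.length
decreasing_by
  all_goals first
    | exact Nat.lt_succ_of_le (decodeA_inner_len _ _ _)
    | simp

def decode_entities (labels : List String) : List (Int × Int × String) :=
  decodeA_go 0 labels []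

-- ===== PORT B =====
-- parsed = tuple(tag.split("-", 1)) if "-" in tag else None
def decodeB_parse (tag : String) : Option (String × String) :=
  if PySem.Str.isIn "-" tag then some (pvSplitDash tag) else none

-- one iteration of B's flat for-loop; state = (t, spans, open_span)
def decodeB_step (st : Int × List (Int × Int × String) × Option (Int × Int × String))
    (tag : String) : Int × List (Int × Int × String) × Option (Int × Int × String) :=
  let t := st.1
  let spans := st.2.1
  let opn := st.2.2
  let parsed := decodeB_parse tag
  let ext : Bool :=      -- open_span is not None and parsed is not None and parsed[0] in ("I","E") and tag.endswith("-" + open_span[2])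
    match opn with
    | none => false
    | some o =>
      match parsed with
      | none => false
      | some p => (p.1 == "I" || p.1 == "E") && PySem.Str.endswith tag ("-" ++ o.2.2)
  if ext then
    match opn with
    | some o =>
        if PySem.Str.startswith tag "E-" then (t + 1, spans ++ [(o.1, t, o.2.2)], none)
        else (t + 1, spans, some (o.1, t, o.2.2))
    | none => (t + 1, spans, none)   -- unreachable: ext forces opn = some _
  else
    let spans1 := match opn with | some o => spans ++ [o] | none => spans
    let spans2 := match parsed with
      | some p => if p.1 == "S" then spans1 ++ [(t, t, p.2)] else spans1
      | none => spans1
    let opn2 : Option (Int × Int × String) :=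
      match parsed with
      | some p => if p.1 == "B" then some (t, t, p.2) else none
      | none => none
    (t + 1, spans2, opn2)

-- final 'if open_span is not None: spans.append(open_span)'
def decodeB_flush (st : Int × List (Int × Int × String) × Option (Int × Int × String)) :
    List (Int × Int × String) :=
  match st.2.2 with
  | some o => st.2.1 ++ [o]
  | none => st.2.1

def decode_entities_alt (labels : List String) : List (Int × Int × String) :=
  decodeB_flush (labels.foldl decodeB_step (0, [], none))

-- ===== PRECONDITION & SPEC =====
-- A is total: it returns normally on every list of strings, so no Pre_ is defined.
def Spec_decode_entities (labels : List String) (out : List (Int × Int × String)) : Prop := out = decode_entities_alt labels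
instance (labels : List String) (out : List (Int × Int × String)) : Decidable (Spec_decode_entities labels out) := by unfold Spec_decode_entities; infer_instance

-- ===== CLAIM (what is proved, stated in full; the proofs are below) =====
def Claim_equal_decode_entities : Prop := ∀ (labels : List String), Dom_decode_entities labels → Spec_decode_entities labels (decode_entities labels)

-- ===== LEMMAS AND PROOFS =====

-- a tag ending in "-…" contains a dash
theorem hasDash_of_endswith (l et : String)
    (h : PySem.Str.endswith l ("-" ++ et) = true) : PySem.Str.isIn "-" l = true := by
  rw [PySem.Str.isIn_iff_infix]
  rw [PySem.Str.endswith_eq, PySem.Chars.endswith_iff] at h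
  have h1 : ("-" : String).toList <+: ("-" ++ et).toList := by
    simp [String.toList_append]
  exact h1.isInfix.trans h.isInfix

theorem parse_of_endswith (l et : String)
    (h : PySem.Str.endswith l ("-" ++ et) = true) :
    decodeB_parse l = some (pvSplitDash l) := by
  unfold decodeB_parse
  rw [if_pos (hasDash_of_endswith l et h)]

-- B's step from an open state, when the tag extends the open span
theorem decodeB_step_open (j s e : Int) (spans : List (Int × Int × String)) (et l : String)
    (hC : (PySem.Str.endswith l ("-" ++ et)
        && ((pvSplitDash l).1 == "I" || (pvSplitDash l).1 == "E")) = true) :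
    decodeB_step (j, spans, some (s, e, et)) l =
      if PySem.Str.startswith l "E-" then (j + 1, spans ++ [(s, j, et)], none)
      else (j + 1, spans, some (s, j, et)) := by
  obtain ⟨h1, h2⟩ := Bool.and_eq_true_iff.mp hC
  have hp := parse_of_endswith l et h1
  simp at h1 h2
  simp [decodeB_step, hp, h1, h2]

-- B's step from an open state, when the tag does NOT extend: close first, then step closed
theorem decodeB_step_mismatch (j : Int) (spans : List (Int × Int × String))
    (o : Int × Int × String) (l : String)
    (hC : (PySem.Str.endswith l ("-" ++ o.2.2)
        && ((pvSplitDash l).1 == "I" || (pvSplitDash l).1 == "E")) = false) :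
    decodeB_step (j, spans, some o) l = decodeB_step (j, spans ++ [o], none) l := by
  cases hp : decodeB_parse l with
  | none => simp [decodeB_step, hp]
  | some p =>
    have hpl : p = pvSplitDash l := by
      simp [decodeB_parse] at hp
      exact hp.2.symm
    subst hpl
    simp at hC
    simp [decodeB_step, hp]
    intro h1 h2
    obtain ⟨hI, hE⟩ := hC h2
    rcases h1 with h1 | h1
    · exact absurd h1 hI
    · exact absurd h1 hE

-- B's step from a closed state
theorem decodeB_step_closed (j : Int) (spans : List (Int × Int × String)) (l : String) :
    decodeB_step (j, spans, none) l =
      (j + 1,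
        (match decodeB_parse l with
         | some p => if p.1 == "S" then spans ++ [(j, j, p.2)] else spans
         | none => spans),
        (match decodeB_parse l with
         | some p => if p.1 == "B" then some (j, j, p.2) else none
         | none => none)) := by
  cases hp : decodeB_parse l with
  | none => simp [decodeB_step, hp]
  | some p => simp [decodeB_step, hp]

-- A's inner scan, seen from B's side: folding on from an open state equals closing
-- the span where the scan stops and folding on from there with a closed state
theorem inner_eq (et : String) (rest : List String) (j s : Int)
    (spans : List (Int × Int × String)) :
    decodeB_flush (rest.foldl decodeB_step (j, spans, some (s, j - 1, et)))
      = decodeB_flush ((decodeA_inner et j rest).2.foldl decodeB_step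
          ((decodeA_inner et j rest).1, spans ++ [(s, (decodeA_inner et j rest).1 - 1, et)], none)) := by
  induction rest generalizing j spans with
  | nil => simp [decodeA_inner, decodeB_flush]
  | cons l rest' ih =>
    have hstep : ∀ st : Int × List (Int × Int × String) × Option (Int × Int × String),
        ((l :: rest').foldl decodeB_step st) = rest'.foldl decodeB_step (decodeB_step st l) :=
      fun _ => rfl
    by_cases hC : (PySem.Str.endswith l ("-" ++ et)
        && ((pvSplitDash l).1 == "I" || (pvSplitDash l).1 == "E")) = true
    · rw [hstep, decodeB_step_open j s (j - 1) spans et l hC]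
      by_cases hE : PySem.Str.startswith l "E-" = true
      · rw [if_pos hE]
        have hA : decodeA_inner et j (l :: rest') = (j + 1, rest') := by
          simp only [decodeA_inner]; rw [if_pos hC, if_pos hE]
        rw [hA]
        norm_num
      · rw [if_neg hE]
        have hA : decodeA_inner et j (l :: rest') = decodeA_inner et (j + 1) rest' := by
          simp only [decodeA_inner]; rw [if_pos hC, if_neg hE]
        rw [hA]
        have h2 := ih (j + 1) spans
        simp only [add_sub_cancel_right] at h2
        exact h2
    · have hCf : (PySem.Str.endswith l ("-" ++ et)
          && ((pvSplitDash l).1 == "I" || (pvSplitDash l).1 == "E")) = false := by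
        revert hC
        cases (PySem.Str.endswith l ("-" ++ et)
          && ((pvSplitDash l).1 == "I" || (pvSplitDash l).1 == "E")) <;> simp
      have hA : decodeA_inner et j (l :: rest') = (j, l :: rest') := by
        simp only [decodeA_inner]; rw [if_neg hC]
      rw [hA, hstep, decodeB_step_mismatch j spans (s, j - 1, et) l hCf, hstep]

-- main loop correspondence
theorem go_eq (n : Nat) (rest : List String) (hn : rest.length ≤ n) (i : Int)
    (spans : List (Int × Int × String)) :
    decodeA_go i rest spans = decodeB_flush (rest.foldl decodeB_step (i, spans, none)) := by
  induction n generalizing rest i spans with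
  | zero =>
    have : rest = [] := List.eq_nil_of_length_eq_zero (Nat.le_zero.mp hn)
    subst this
    simp [decodeA_go, decodeB_flush]
  | succ n ih =>
    match rest with
    | [] => simp [decodeA_go, decodeB_flush]
    | tag :: rest' =>
      have hlen : rest'.length ≤ n := by simpa using Nat.succ_le_succ_iff.mp hn
      have hstep : ∀ st : Int × List (Int × Int × String) × Option (Int × Int × String),
          ((tag :: rest').foldl decodeB_step st) = rest'.foldl decodeB_step (decodeB_step st tag) :=
        fun _ => rfl
      rw [hstep, decodeB_step_closed]
      by_cases hop : (tag == "O" || tag == "<pad>") = true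
      · have hdash : PySem.Str.isIn "-" tag = false := by
          rcases Bool.or_eq_true_iff.mp hop with h | h
          · rw [eq_of_beq h]; decide
          · rw [eq_of_beq h]; decide
        have hp : decodeB_parse tag = none := by unfold decodeB_parse; rw [hdash]; rfl
        simp only [decodeA_go, hop, hp]
        exact ih rest' hlen (i + 1) spans
      · by_cases hdash : PySem.Str.isIn "-" tag = true
        · have hp : decodeB_parse tag = some (pvSplitDash tag) := by
            unfold decodeB_parse; rw [hdash]; rfl
          simp only [decodeA_go, hop, Bool.false_eq_true, if_false, hdash,
            Bool.not_true, if_false, hp]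
          by_cases hS : ((pvSplitDash tag).1 == "S") = true
          · have hB : ((pvSplitDash tag).1 == "B") = false := by
              rw [eq_of_beq hS]; decide
            rw [if_pos hS]
            simp only [hS, hB, Bool.false_eq_true, if_false, if_true]
            exact ih rest' hlen (i + 1) (spans ++ [(i, i, (pvSplitDash tag).2)])
          · by_cases hB : ((pvSplitDash tag).1 == "B") = true
            · -- B- opens a span; use inner_eq, then the IH on the remaining suffix
              rw [if_neg (by simp [hS]), if_pos hB]
              simp only [hS, hB, Bool.false_eq_true, if_false, if_true]
              have h1 := inner_eq (pvSplitDash tag).2 rest' (i + 1) i spans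
              simp only [add_sub_cancel_right] at h1
              rw [h1]
              exact ih _ (le_trans (decodeA_inner_len _ _ _) hlen) _ _
            · rw [if_neg (by simp [hS]), if_neg (by simp [hB])]
              simp only [hS, hB, Bool.false_eq_true, if_false]
              exact ih rest' hlen (i + 1) spans
        · have hdash' : PySem.Str.isIn "-" tag = false := by
            cases h : PySem.Str.isIn "-" tag
            · rfl
            · exact absurd h hdash
          have hp : decodeB_parse tag = none := by unfold decodeB_parse; rw [hdash']; rfl
          simp only [decodeA_go, hop, Bool.false_eq_true, if_false, hdash',
            Bool.not_false, hp]
          exact ih rest' hlen (i + 1) spans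

-- ===== VERDICT (by name: the statement is the Claim_ definition above) =====
theorem decode_entities_spec : Claim_equal_decode_entities := by
  intro labels _
  show decode_entities labels = decode_entities_alt labels
  unfold decode_entities decode_entities_alt
  exact go_eq labels.length labels le_rfl 0 []
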